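-- pv_equiv track=rewrite | github.com/vedanalytics/paint2 | painter_app/utils/painter_utils.py | update_line
-- ===== SOURCE A (Python) =====
-- def update_line(line_arr, x1, x2, left_char, right_char, middle_char):
--     """
--
--     :type line_arr: str
--     """
--     if len(line_arr) > 0 and 0 < x1 < len(line_arr) and 0 < x2 < len(line_arr):
--         for i in range(x1, x2 + 1):
--             if i == x1:
--                 line_arr[i] = left_char
--             elif x1 < i < x2:
--                 if len(middle_char.strip()) > 0:
--                     line_arr[i] = middle_char
--             elif i == x2:
--                 line_arr[i] = right_char
--     return line_arr
-- ===== SOURCE B (Python) =====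
-- def update_line(line_arr, x1, x2, left_char, right_char, middle_char):
--     n = len(line_arr)
--     if n > 0 and 0 < x1 < n and 0 < x2 < n and x1 <= x2:
--         if x1 == x2:
--             seg = [left_char]
--         else:
--             interior = [middle_char] * (x2 - x1 - 1) if middle_char.strip() else line_arr[x1 + 1:x2]
--             seg = [left_char] + interior + [right_char]
--         line_arr[:] = line_arr[:x1] + seg + line_arr[x2 + 1:]
--     return line_arr
-- ===== Notes on version B (the rewrite author's own statement) =====
-- stated objective: alternative
-- what changed: Instead of A's in-place loop over range(x1, x2+1) with per-index i==x1 / interior / i==x2 branches, B constructs the whole updated segment as a list concatenation (prefix slice + [left] + interior list + [right] + suffix slice) and assigns it back in one slice assignment; no per-index branching or index arithmetic inside a loop.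
import Mathlib
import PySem

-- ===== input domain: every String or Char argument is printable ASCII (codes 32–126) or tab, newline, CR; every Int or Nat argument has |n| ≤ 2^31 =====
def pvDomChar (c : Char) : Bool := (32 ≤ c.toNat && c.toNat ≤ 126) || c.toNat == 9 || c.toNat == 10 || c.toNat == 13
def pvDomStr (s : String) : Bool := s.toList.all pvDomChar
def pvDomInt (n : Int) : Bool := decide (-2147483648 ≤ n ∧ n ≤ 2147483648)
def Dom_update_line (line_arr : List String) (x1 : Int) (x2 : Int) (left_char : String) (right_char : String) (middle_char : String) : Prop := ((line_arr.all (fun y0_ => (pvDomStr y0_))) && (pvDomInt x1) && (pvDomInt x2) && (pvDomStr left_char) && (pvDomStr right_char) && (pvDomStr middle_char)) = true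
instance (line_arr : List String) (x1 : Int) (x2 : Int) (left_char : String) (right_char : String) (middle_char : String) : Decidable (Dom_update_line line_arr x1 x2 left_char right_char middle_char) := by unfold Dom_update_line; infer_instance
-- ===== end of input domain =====

-- B builds the updated list as a concatenation of slices (prefix + segment + suffix)
-- and slice-assigns it back, instead of A's in-place branchy index loop; B mutates
-- line_arr like A (via line_arr[:] = ...), equivalence is about the returned value.

-- ===== PORT A =====
-- literal transliteration of A: one guard, then a loop over range(x1, x2+1)
-- with i==x1 / x1<i<x2 / i==x2 branches in source order
def update_line (line_arr : List String) (x1 : Int) (x2 : Int) (left_char : String) (right_char : String) (middle_char : String) : List String :=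
  if 0 < (line_arr.length : Int) ∧ (0 < x1 ∧ x1 < (line_arr.length : Int)) ∧ (0 < x2 ∧ x2 < (line_arr.length : Int)) then
    (PySem.List.pyRange x1 (x2 + 1)).foldl
      (fun arr i =>
        if i = x1 then PySem.List.pySetD arr i left_char
        else if x1 < i ∧ i < x2 then
          (if 0 < PySem.Str.len (PySem.Str.strip middle_char) then PySem.List.pySetD arr i middle_char else arr)
        else if i = x2 then PySem.List.pySetD arr i right_char
        else arr)
      line_arr
  else line_arr

-- ===== PORT B =====
-- literal transliteration of Source B: guard (with x1 ≤ x2); build the replacement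
-- segment ([left] when x1 = x2, else [left] ++ interior ++ [right], the interior a
-- replicate of middle_char or the original slice line_arr[x1+1:x2]); result is
-- line_arr[:x1] ++ seg ++ line_arr[x2+1:]
def update_line_alt (line_arr : List String) (x1 : Int) (x2 : Int) (left_char : String) (right_char : String) (middle_char : String) : List String :=
  let n : Int := line_arr.length
  if 0 < n ∧ (0 < x1 ∧ x1 < n) ∧ (0 < x2 ∧ x2 < n) ∧ x1 ≤ x2 then
    let seg :=
      if x1 = x2 then [left_char]
      else
        let interior :=
          if 0 < PySem.Str.len (PySem.Str.strip middle_char) then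
            List.replicate (x2 - x1 - 1).toNat middle_char
          else PySem.List.slice line_arr (some (x1 + 1)) (some x2)
        [left_char] ++ interior ++ [right_char]
    PySem.List.slice line_arr none (some x1) ++ seg ++ PySem.List.slice line_arr (some (x2 + 1)) none
  else line_arr

-- ===== PRECONDITION & SPEC =====
def Spec_update_line (line_arr : List String) (x1 : Int) (x2 : Int) (left_char : String) (right_char : String) (middle_char : String) (out : List String) : Prop := out = update_line_alt line_arr x1 x2 left_char right_char middle_char
instance (line_arr : List String) (x1 : Int) (x2 : Int) (left_char : String) (right_char : String) (middle_char : String) (out : List String) : Decidable (Spec_update_line line_arr x1 x2 left_char right_char middle_char out) := by unfold Spec_update_line; infer_instance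

-- ===== CLAIM =====
def Claim_equal_update_line : Prop := ∀ (line_arr : List String) (x1 : Int) (x2 : Int) (left_char : String) (right_char : String) (middle_char : String), Dom_update_line line_arr x1 x2 left_char right_char middle_char → Spec_update_line line_arr x1 x2 left_char right_char middle_char (update_line line_arr x1 x2 left_char right_char middle_char)

-- ===== LEMMAS AND PROOFS =====

-- folding a constant-set over range a b fills positions [a, b) with v
theorem fold_fill (v : String) (k : Nat) : ∀ (a b : Int) (arr : List String),
    (b - a).toNat = k → 0 ≤ a → a ≤ b → b ≤ (arr.length : Int) →
    (PySem.List.pyRange a b).foldl (fun acc i => PySem.List.pySetD acc i v) arr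
      = arr.take a.toNat ++ List.replicate (b - a).toNat v ++ arr.drop b.toNat := by
  induction k with
  | zero =>
    intro a b arr hk ha hab hb
    have hba : b = a := by omega
    subst hba
    rw [PySem.List.pyRange_one_eq_nil le_rfl]
    simp [List.take_append_drop]
  | succ k ih =>
    intro a b arr hk ha hab hb
    have hlt : a < b := by omega
    have han : a.toNat < arr.length := by omega
    rw [PySem.List.pyRange_one_cons hlt, List.foldl_cons,
        PySem.List.pySetD_of_nonneg arr v ha]
    have := ih (a + 1) b (arr.set a.toNat v) (by omega) (by omega) (by omega)
      (by simp; omega)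
    rw [this]
    have h1 : (a + 1).toNat = a.toNat + 1 := by omega
    have hnb : a.toNat < b.toNat := by omega
    rw [h1, List.take_set, List.drop_set]
    rw [if_pos hnb]
    have htk : (arr.take (a.toNat + 1)).set a.toNat v = arr.take a.toNat ++ [v] := by
      rw [List.take_add_one, List.getElem?_eq_getElem han]
      rw [show (some arr[a.toNat]).toList = [arr[a.toNat]] from rfl]
      rw [List.set_append, if_neg (by simp only [List.length_take]; omega)]
      congr 1
      rw [show a.toNat - (List.take a.toNat arr).length = 0 from by
            simp only [List.length_take]; omega]
      rfl
    rw [htk]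
    have hr : [v] ++ List.replicate (b - (a + 1)).toNat v = List.replicate (b - a).toNat v := by
      have : (b - a).toNat = (b - (a + 1)).toNat + 1 := by omega
      rw [this, List.replicate_succ]
      rfl
    rw [List.append_assoc, List.append_assoc, ← List.append_assoc [v], hr,
        ← List.append_assoc]

-- folding a body that ignores its loop variable and returns the accumulator is the identity
theorem foldl_skip {α β : Type} (l : List α) (init : β) :
    List.foldl (fun acc (_ : α) => acc) init l = init := by
  induction l generalizing init with
  | nil => rfl
  | cons x l ih => simp [List.foldl_cons, ih]

-- take of a set past a written index keeps the write
theorem set_take_succ (arr : List String) (m : Nat) (v : String) (h : m < arr.length) :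
    (arr.set m v).take (m + 1) = arr.take m ++ [v] := by
  rw [List.take_set]
  rw [List.take_add_one, List.getElem?_eq_getElem h]
  rw [show (some arr[m]).toList = [arr[m]] from rfl]
  rw [List.set_append, if_neg (by simp only [List.length_take]; omega)]
  congr 1
  rw [show m - (List.take m arr).length = 0 from by simp only [List.length_take]; omega]
  rfl

-- ===== VERDICT (by name: the statement is the Claim_ definition above) =====
theorem update_line_spec : Claim_equal_update_line := by
  intro line_arr x1 x2 left_char right_char middle_char _hDom
  unfold Spec_update_line update_line update_line_alt
  by_cases hg : 0 < (line_arr.length : Int) ∧ (0 < x1 ∧ x1 < (line_arr.length : Int)) ∧ (0 < x2 ∧ x2 < (line_arr.length : Int))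
  · rw [if_pos hg]
    obtain ⟨hn, ⟨hx1p, hx1l⟩, hx2p, hx2l⟩ := hg
    by_cases hle : x1 ≤ x2
    · rw [if_pos ⟨hn, ⟨hx1p, hx1l⟩, ⟨hx2p, hx2l⟩, hle⟩]
      have hx1n : x1.toNat < line_arr.length := by omega
      have hx2n : x2.toNat < line_arr.length := by omega
      rw [PySem.List.slice_to _ (by omega : (0:Int) ≤ x1),
          PySem.List.slice_from _ (by omega : (0:Int) ≤ x2 + 1)]
      have h21 : (x2 + 1).toNat = x2.toNat + 1 := by omega
      rw [h21]
      rcases eq_or_lt_of_le hle with heq | hlt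
      · -- x1 = x2: A's loop is the single iteration i = x1, which writes left_char
        subst heq
        rw [if_pos rfl, PySem.List.pyRange_one_singleton, List.foldl_cons]
        simp only [List.foldl_nil]
        rw [PySem.List.pySetD_of_nonneg line_arr left_char (by omega),
            List.set_eq_take_cons_drop left_char hx1n]
        simp
      · -- x1 < x2
        rw [if_neg (by omega : ¬ x1 = x2)]
        rw [PySem.List.pyRange_one_cons (by omega : x1 < x2 + 1),
            PySem.List.pyRange_one_succ_right (by omega : x1 + 1 ≤ x2)]
        simp only [List.foldl_cons, List.foldl_append, List.foldl_nil]
        rw [if_neg (by omega : ¬ x2 = x1), if_neg (by omega : ¬ (x1 < x2 ∧ x2 < x2))]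
        simp only [if_true]
        rw [PySem.List.foldl_congr_mem (PySem.List.pyRange (x1 + 1) x2) _
              (fun acc i => if 0 < PySem.Str.len (PySem.Str.strip middle_char) then
                              PySem.List.pySetD acc i middle_char else acc)
              _ (by
                intro acc i hi
                rw [PySem.List.mem_pyRange_one] at hi
                rw [if_neg (by omega : ¬ i = x1), if_pos (by omega : x1 < i ∧ i < x2)])]
        by_cases hm : 0 < PySem.Str.len (PySem.Str.strip middle_char)
        · -- middle fill active: A is left-write, bulk fill, right-write
          simp only [if_pos hm]
          rw [PySem.List.pySetD_of_nonneg line_arr left_char (by omega)]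
          rw [fold_fill middle_char (x2 - (x1 + 1)).toNat (x1 + 1) x2
                (line_arr.set x1.toNat left_char) rfl (by omega) (by omega) (by simp; omega)]
          have h11 : (x1 + 1).toNat = x1.toNat + 1 := by omega
          rw [h11, set_take_succ line_arr x1.toNat left_char hx1n]
          rw [List.drop_set, if_pos (by omega : x1.toNat < x2.toNat)]
          rw [PySem.List.pySetD_of_nonneg _ right_char (by omega)]
          rw [List.drop_eq_getElem_cons hx2n]
          rw [List.set_append,
              if_neg (by simp; omega)]
          rw [show x2.toNat - (line_arr.take x1.toNat ++ [left_char] ++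
                List.replicate (x2 - (x1 + 1)).toNat middle_char).length = 0 from by
                simp; omega]
          rw [List.set_cons_zero]
          rw [show (x2 - (x1 + 1)).toNat = (x2 - x1 - 1).toNat from by omega]
          simp [List.append_assoc]
        · -- no middle fill: A is two point writes; B keeps the original interior slice
          simp only [if_neg hm]
          rw [foldl_skip]
          rw [PySem.List.pySetD_of_nonneg line_arr left_char (by omega),
              PySem.List.pySetD_of_nonneg _ right_char (by omega)]
          rw [PySem.List.slice_toNat _ (by omega : (0:Int) ≤ x1 + 1) (by omega : (0:Int) ≤ x2)]
          have h11 : (x1 + 1).toNat = x1.toNat + 1 := by omega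
          rw [h11]
          rw [List.set_eq_take_cons_drop left_char hx1n]
          rw [List.set_append,
              if_neg (by simp only [List.length_take]; omega)]
          rw [show x2.toNat - (line_arr.take x1.toNat).length = x2.toNat - x1.toNat from by
                simp only [List.length_take]; omega]
          rw [show (x2.toNat - x1.toNat) = (x2.toNat - x1.toNat - 1) + 1 from by omega]
          rw [List.set_cons_succ]
          rw [List.set_eq_take_cons_drop right_char
                (by simp only [List.length_drop]; omega :
                  x2.toNat - x1.toNat - 1 < (line_arr.drop (x1.toNat + 1)).length)]
          rw [List.drop_drop]
          rw [show x1.toNat + 1 + (x2.toNat - x1.toNat - 1 + 1) = x2.toNat + 1 from by omega,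
              show x2.toNat - (x1.toNat + 1) = x2.toNat - x1.toNat - 1 from by omega]
          simp [List.append_assoc]
    · -- x2 < x1: A's range is empty, B's guard fails
      rw [if_neg (by tauto : ¬ (0 < (line_arr.length : Int) ∧ (0 < x1 ∧ x1 < (line_arr.length : Int)) ∧ (0 < x2 ∧ x2 < (line_arr.length : Int)) ∧ x1 ≤ x2))]
      rw [PySem.List.pyRange_one_eq_nil (by omega : x2 + 1 ≤ x1)]
      rfl
  · rw [if_neg hg, if_neg (by tauto)]
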